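-- pv_equiv track=rewrite | github.com/mouredev/retos-programacion-2023 | Retos/Reto #30 - EL TECLADO T9 [Media]/python/TiagoAlvarezSchiaffino.py | t9_interpreter
-- ===== SOURCE A (Python) =====
-- def t9_interpreter(input_sequence: str) -> str:
--     """
--     Convert T9 keypresses to their letter representation.
--
--     Args:
--         input_sequence (str): T9 keypress sequence.
--
--     Returns:
--         str: Letter representation of the keypress sequence.
--     """
--     t9_mapping = {
--         "1": [",", ".", "?", "!"],
--         "2": ["A", "B", "C"],
--         "3": ["D", "E", "F"],
--         "4": ["G", "H", "I"],
--         "5": ["J", "K", "L"],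
--         "6": ["M", "N", "O"],
--         "7": ["P", "Q", "R", "S"],
--         "8": ["T", "U", "V"],
--         "9": ["W", "X", "Y", "Z"],
--         "0": [" "],
--     }
--
--     def t9_to_letters(t9_number: str) -> str:
--         """
--         Convert a T9 keypress block to its corresponding letter.
--
--         Args:
--             t9_number (str): T9 keypress block.
--
--         Returns:
--             str: Corresponding letter.
--         """
--         length = len(t9_number) - 1
--         index = int(t9_number[0])
--         letter = t9_mapping[str(index)][length]
--         return letter
--
--     words = [t9_to_letters(block) for block in input_sequence.split("-")]
--     return "".join(words)
-- ===== SOURCE B (Python) =====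
-- def t9_interpreter(input_sequence: str) -> str:
--     # One explicit pass: accumulate a block, decode it at each '-' (a sentinel
--     # '-' appended at the end decodes the final block).
--     keys = {
--         "1": ",.?!",
--         "2": "ABC",
--         "3": "DEF",
--         "4": "GHI",
--         "5": "JKL",
--         "6": "MNO",
--         "7": "PQRS",
--         "8": "TUV",
--         "9": "WXYZ",
--         "0": " ",
--     }
--     result = []
--     block = ""
--     for ch in input_sequence + "-":
--         if ch == "-":
--             result.append(keys[block[0]][len(block) - 1])
--             block = ""
--         else:
--             block += ch
--     return "".join(result)
-- ===== Notes on version B (the rewrite author's own statement) =====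
-- stated objective: alternative
-- what changed: Replaces A's split('-') plus per-block list comprehension by a single explicit pass over the characters that accumulates the current block and decodes it (first char keys a letter string indexed by block length - 1) whenever a '-' or the appended sentinel '-' is reached.
import Mathlib
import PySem

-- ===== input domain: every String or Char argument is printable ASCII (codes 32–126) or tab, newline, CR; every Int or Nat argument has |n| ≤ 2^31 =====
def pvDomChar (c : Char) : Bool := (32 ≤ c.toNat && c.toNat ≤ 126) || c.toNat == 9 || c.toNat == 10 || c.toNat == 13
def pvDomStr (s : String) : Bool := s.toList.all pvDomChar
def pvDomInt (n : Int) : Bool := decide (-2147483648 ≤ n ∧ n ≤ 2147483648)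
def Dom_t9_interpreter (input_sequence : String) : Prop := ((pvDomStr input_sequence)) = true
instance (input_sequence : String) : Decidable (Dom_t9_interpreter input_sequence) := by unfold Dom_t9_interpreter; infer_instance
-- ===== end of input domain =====

-- B replaces A's split-then-comprehension by one explicit pass that accumulates a block
-- and decodes it at each '-' (sentinel '-' appended for the final block); alternative decomposition, same cost.

-- ===== PORT A =====
def pvT9Mapping : PySem.Dict String (List String) :=
  PySem.Dict.ofList
    [("1", [",", ".", "?", "!"]), ("2", ["A", "B", "C"]), ("3", ["D", "E", "F"]),
     ("4", ["G", "H", "I"]), ("5", ["J", "K", "L"]), ("6", ["M", "N", "O"]),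
     ("7", ["P", "Q", "R", "S"]), ("8", ["T", "U", "V"]), ("9", ["W", "X", "Y", "Z"]),
     ("0", [" "])]

-- t9_to_letters; each 'none' branch is a point where the Python raises (excluded by Pre_)
def pvT9ToLetters (t9_number : String) : String :=
  let length : Int := (PySem.Str.len t9_number : Int) - 1
  match PySem.Str.pyGet? t9_number 0 with
  | none => ""                                   -- IndexError: empty block
  | some c =>
    match PySem.Int.ofStr? (String.ofList [c]) with
    | none => ""                                 -- ValueError: non-digit
    | some index =>
      match PySem.List.pyGet? (pvT9Mapping.getD (PySem.Int.toStr index) []) length with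
      | none => ""                               -- IndexError: block too long
      | some letter => letter

def t9_interpreter (input_sequence : String) : String :=
  match PySem.Str.split? input_sequence "-" with
  | none => ""                                   -- unreachable: separator "-" is nonempty
  | some blocks => PySem.Str.join "" (blocks.map pvT9ToLetters)

-- ===== PORT B =====
def pvKeysAlt : PySem.Dict String String :=
  PySem.Dict.ofList
    [("1", ",.?!"), ("2", "ABC"), ("3", "DEF"), ("4", "GHI"), ("5", "JKL"),
     ("6", "MNO"), ("7", "PQRS"), ("8", "TUV"), ("9", "WXYZ"), ("0", " ")]

-- keys[block[0]][len(block) - 1]; 'none' branches are where the Python raises (outside Pre_)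
def pvDecodeAlt (block : List Char) : String :=
  match PySem.List.pyGet? block 0 with
  | none => ""                                   -- IndexError: empty block
  | some c =>
    match PySem.Str.pyGet? (pvKeysAlt.getD (String.ofList [c]) "") ((block.length : Int) - 1) with
    | none => ""                                 -- KeyError / IndexError
    | some letter => String.ofList [letter]

def pvStepAlt : List Char × List String → Char → List Char × List String
  | (block, result), ch =>
    if ch = '-' then ([], result ++ [pvDecodeAlt block])
    else (block ++ [ch], result)

def t9_interpreter_alt (input_sequence : String) : String :=
  PySem.Str.join "" ((input_sequence.toList ++ ['-']).foldl pvStepAlt ([], [])).2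

-- ===== PRECONDITION & SPEC =====
-- Pre_ excludes exactly the inputs on which the Python A raises: some '-'-separated block
-- is empty (IndexError), starts with a non-digit (ValueError), or is longer than the
-- letter list of its leading key (IndexError).
def Pre_t9_interpreter (input_sequence : String) : Prop :=
  ∀ b ∈ PySem.Chars.splitOn input_sequence.toList ['-'],
    (b.head?.any fun c => PySem.Chars.isdigit c &&
      decide (b.length ≤ if c = '0' then 1 else if c = '1' ∨ c = '7' ∨ c = '9' then 4 else 3)) = true
instance (input_sequence : String) : Decidable (Pre_t9_interpreter input_sequence) := by
  unfold Pre_t9_interpreter; infer_instance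

def pvWitness_t9_interpreter : String := "44-444"

def Spec_t9_interpreter (input_sequence : String) (out : String) : Prop := out = t9_interpreter_alt input_sequence
instance (input_sequence : String) (out : String) : Decidable (Spec_t9_interpreter input_sequence out) := by unfold Spec_t9_interpreter; infer_instance

-- ===== CLAIM (what is proved, stated in full; the proofs are below) =====
def Claim_equal_t9_interpreter : Prop := ∀ (input_sequence : String), Dom_t9_interpreter input_sequence → Pre_t9_interpreter input_sequence → Spec_t9_interpreter input_sequence (t9_interpreter input_sequence)

-- ===== LEMMAS AND PROOFS =====

-- reference split: the blocks of l when cut at '-', with b the block accumulated so far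
def pvSplit (b : List Char) : List Char → List (List Char)
  | [] => [b]
  | c :: rest => if c = '-' then b :: pvSplit [] rest else pvSplit (b ++ [c]) rest

theorem pvSplitOn_go_spec (l : List Char) : ∀ (fuel : Nat) (cur : List Char) (acc : List (List Char)),
    l.length < fuel →
    PySem.Chars.splitOn.go ['-'] fuel l cur acc = acc.reverse ++ pvSplit cur.reverse l := by
  induction l with
  | nil =>
    intro fuel cur acc h
    match fuel with
    | fuel + 1 => simp [PySem.Chars.splitOn.go, pvSplit]
  | cons c rest ih =>
    intro fuel cur acc h
    match fuel with
    | fuel + 1 =>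
      by_cases hc : c = '-'
      · subst hc
        have hpre : (['-'].isPrefixOf ('-' :: rest)) = true := by
          simp [List.isPrefixOf]
        rw [show PySem.Chars.splitOn.go ['-'] (fuel + 1) ('-' :: rest) cur acc
              = PySem.Chars.splitOn.go ['-'] fuel rest [] (cur.reverse :: acc) by
            simp [PySem.Chars.splitOn.go, hpre]]
        rw [ih fuel [] (cur.reverse :: acc) (by simpa using h)]
        simp [pvSplit]
      · have hpre : (['-'].isPrefixOf (c :: rest)) = false := by
          show (('-' == c) && ([].isPrefixOf rest)) = false
          simp only [show ([] : List Char).isPrefixOf rest = true from rfl, Bool.and_true, beq_eq_false_iff_ne, ne_eq]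
          exact fun hcc => hc hcc.symm
        rw [show PySem.Chars.splitOn.go ['-'] (fuel + 1) (c :: rest) cur acc
              = if ['-'].isPrefixOf (c :: rest) = true
                then PySem.Chars.splitOn.go ['-'] fuel (List.drop 1 (c :: rest)) [] (cur.reverse :: acc)
                else PySem.Chars.splitOn.go ['-'] fuel rest (c :: cur) acc from rfl, hpre]
        rw [if_neg (by simp)]
        rw [ih fuel (c :: cur) acc (by simpa using h)]
        simp [pvSplit, hc]

theorem pvSplitOn_eq (l : List Char) :
    PySem.Chars.splitOn l ['-'] = pvSplit [] l := by
  rw [PySem.Chars.splitOn, pvSplitOn_go_spec l (l.length + 1) [] [] (by omega)]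
  simp

theorem pvFold_spec (cs : List Char) : ∀ (block : List Char) (res : List String),
    ((cs ++ ['-']).foldl pvStepAlt (block, res)).2 = res ++ (pvSplit block cs).map pvDecodeAlt := by
  induction cs with
  | nil => intro block res; simp [pvStepAlt, pvSplit]
  | cons c rest ih =>
    intro block res
    by_cases hc : c = '-'
    · subst hc
      simp only [List.cons_append, List.foldl_cons]
      rw [show pvStepAlt (block, res) '-' = ([], res ++ [pvDecodeAlt block]) from by simp [pvStepAlt]]
      rw [ih [] (res ++ [pvDecodeAlt block])]
      simp [pvSplit]
    · simp only [List.cons_append, List.foldl_cons]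
      rw [show pvStepAlt (block, res) c = (block ++ [c], res) from by simp [pvStepAlt, hc]]
      rw [ih (block ++ [c]) res]
      simp [pvSplit, hc]

theorem pvPyGet?_map {α β : Type} (f : α → β) (l : List α) (i : Int) :
    PySem.List.pyGet? (l.map f) i = (PySem.List.pyGet? l i).map f := by
  simp [PySem.List.pyGet?, PySem.List.pyIdx?]

theorem pvDigit_cases (c : Char) (h : PySem.Chars.isdigit c = true) :
    c = '0' ∨ c = '1' ∨ c = '2' ∨ c = '3' ∨ c = '4' ∨ c = '5' ∨ c = '6' ∨ c = '7' ∨ c = '8' ∨ c = '9' := by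
  simp [PySem.Chars.isdigit, Char.le_def] at h
  obtain ⟨h1, h2⟩ := h
  have h1n : 48 ≤ c.toNat := h1
  have h2n : c.toNat ≤ 57 := h2
  have hv := Char.ofNat_toNat c
  interval_cases hc : c.toNat <;> subst hv <;> decide

-- one digit case of pvDecode_eq: both sides index corresponding letter tables
theorem pvDecode_case (c : Char) (rest : List Char) (n : Int) (cs : List Char)
    (h1 : PySem.Int.ofStr? (String.ofList [c]) = some n)
    (h2 : pvT9Mapping.getD (PySem.Int.toStr n) [] = cs.map (fun ch => String.ofList [ch]))
    (h3 : pvKeysAlt.getD (String.ofList [c]) "" = String.ofList cs) :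
    pvT9ToLetters (String.ofList (c :: rest)) = pvDecodeAlt (c :: rest) := by
  unfold pvT9ToLetters pvDecodeAlt
  simp only [PySem.Str.pyGet?_eq, String.toList_ofList, PySem.Chars.pyGet?_eq_listPyGet?,
    PySem.List.pyGet?_zero_cons, PySem.Str.len_eq, h1, h2, h3]
  rw [pvPyGet?_map (fun ch => String.ofList [ch]) cs (((c :: rest).length : Int) - 1)]
  rcases PySem.List.pyGet? cs (((c :: rest).length : Int) - 1) with _ | letter <;> simp

theorem pvDecode_eq (b : List Char) (c : Char) (hh : b.head? = some c)
    (hd : PySem.Chars.isdigit c = true) :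
    pvT9ToLetters (String.ofList b) = pvDecodeAlt b := by
  match b, hh with
  | c :: rest, rfl =>
    rcases pvDigit_cases c hd with h | h | h | h | h | h | h | h | h | h <;> subst h
    · exact pvDecode_case '0' rest 0 [' '] (by decide) (by decide) (by decide)
    · exact pvDecode_case '1' rest 1 [',', '.', '?', '!'] (by decide) (by decide) (by decide)
    · exact pvDecode_case '2' rest 2 ['A', 'B', 'C'] (by decide) (by decide) (by decide)
    · exact pvDecode_case '3' rest 3 ['D', 'E', 'F'] (by decide) (by decide) (by decide)
    · exact pvDecode_case '4' rest 4 ['G', 'H', 'I'] (by decide) (by decide) (by decide)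
    · exact pvDecode_case '5' rest 5 ['J', 'K', 'L'] (by decide) (by decide) (by decide)
    · exact pvDecode_case '6' rest 6 ['M', 'N', 'O'] (by decide) (by decide) (by decide)
    · exact pvDecode_case '7' rest 7 ['P', 'Q', 'R', 'S'] (by decide) (by decide) (by decide)
    · exact pvDecode_case '8' rest 8 ['T', 'U', 'V'] (by decide) (by decide) (by decide)
    · exact pvDecode_case '9' rest 9 ['W', 'X', 'Y', 'Z'] (by decide) (by decide) (by decide)

theorem t9_interpreter_eq_blocks (s : String) :
    t9_interpreter s = PySem.Str.join "" ((pvSplit [] s.toList).map (fun b => pvT9ToLetters (String.ofList b))) := by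
  unfold t9_interpreter
  have hb := PySem.Str.split?_map s "-"
  rcases hs : PySem.Str.split? s "-" with _ | blocks
  · rw [hs] at hb
    simp [PySem.Chars.split?] at hb
  · rw [hs] at hb
    simp only [Option.map_some, PySem.Chars.split?] at hb
    split at hb
    · simp_all
    · have hmap : blocks.map String.toList = pvSplit [] s.toList := by
        rw [← pvSplitOn_eq]
        simpa using hb
      have : blocks = (pvSplit [] s.toList).map String.ofList := by
        rw [← hmap]
        simp [Function.comp_def]
      rw [this]
      simp only [List.map_map, Function.comp_def]

-- ===== VERDICT (by name: the statement is the Claim_ definition above) =====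
theorem t9_interpreter_spec : Claim_equal_t9_interpreter := by
  intro s _ hpre
  unfold Spec_t9_interpreter t9_interpreter_alt
  rw [pvFold_spec s.toList [] [], t9_interpreter_eq_blocks s]
  simp only [List.nil_append]
  congr 1
  apply List.map_congr_left
  intro b hbmem
  have hb := hpre b (by rwa [pvSplitOn_eq])
  rcases b with _ | ⟨c, rest⟩
  · simp at hb
  · simp only [List.head?_cons, Option.any_some, Bool.and_eq_true] at hb
    exact pvDecode_eq (c :: rest) c rfl hb.1
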